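-- pv_equiv track=rewrite | github.com/kkb00714/Algorithm | 백준/Silver II/2805. 나무 자르기/나무 자르기.py | search
-- ===== SOURCE A (Python) =====
-- def cut(trees, height):
--     length = 0
--     for tree in trees:
--         if tree > height:
--             length += tree - height
--     return length
--
-- def search(trees, target_length):
--     lt, rt = 0, max(trees)
--     result = 0
--
--     while lt <= rt:
--         mid = (lt + rt) // 2
--         length = cut(trees, mid)
--
--         # m 보다 나무의 길이가 크거나 같은 경우
--         if length >= target_length:
--             result = mid
--             lt = mid + 1
--         # m 보다 가져간 나무의 길이가 작은 경우
--         else: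
--             rt = mid - 1
--
--     return result
-- ===== SOURCE B (Python) =====
-- def search(trees, target_length):
--     # Sort once, precompute suffix sums; each binary-search probe then costs
--     # O(log n) (bisect + table lookup) instead of a full O(n) scan of trees.
--     ts = sorted(trees)
--     n = len(ts)
--     suffix = [0] * (n + 1)          # suffix[i] = sum of ts[i:]
--     for i in range(n - 1, -1, -1):
--         suffix[i] = suffix[i + 1] + ts[i]
--
--     def cut_at(h):
--         # hand-written bisect_right (no imports): lo = number of trees <= h
--         lo, hi = 0, n
--         while lo < hi:
--             mid = (lo + hi) // 2
--             if h < ts[mid]: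
--                 hi = mid
--             else:
--                 lo = mid + 1
--         return suffix[lo] - (n - lo) * h
--
--     lt, rt = 0, ts[-1]
--     result = 0
--     while lt <= rt:
--         mid = (lt + rt) // 2
--         if cut_at(mid) >= target_length:
--             result = mid
--             lt = mid + 1
--         else:
--             rt = mid - 1
--     return result
-- ===== Notes on version B (the rewrite author's own statement) =====
-- stated objective: faster
-- what changed: B sorts the trees once and builds a suffix-sum table so each binary-search probe computes the cut length with a bisect plus one table lookup instead of rescanning all trees.
import Mathlib
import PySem

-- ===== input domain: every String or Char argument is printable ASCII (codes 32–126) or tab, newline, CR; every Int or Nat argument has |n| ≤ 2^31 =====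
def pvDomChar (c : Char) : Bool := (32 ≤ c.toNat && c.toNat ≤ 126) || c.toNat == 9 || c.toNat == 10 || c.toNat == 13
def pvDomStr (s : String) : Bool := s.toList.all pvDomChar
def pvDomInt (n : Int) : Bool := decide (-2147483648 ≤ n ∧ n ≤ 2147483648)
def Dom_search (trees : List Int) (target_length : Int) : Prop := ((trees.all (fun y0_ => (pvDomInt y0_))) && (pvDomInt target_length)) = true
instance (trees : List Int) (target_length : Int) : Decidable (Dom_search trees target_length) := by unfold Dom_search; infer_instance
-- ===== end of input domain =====

-- B sorts once and precomputes suffix sums so each binary-search probe costs a bisect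
-- plus one table lookup instead of a full scan of the trees (asymptotically faster).

-- ===== PORT A =====
def cut (trees : List Int) (height : Int) : Int :=
  trees.foldl (fun length tree => if height < tree then length + (tree - height) else length) 0

-- the while loop, fuel-based (the fuel passed below strictly exceeds the
-- iteration count: the interval shrinks every iteration, so at most rt-lt+1 < fuel iterations run)
def searchLoop (trees : List Int) (target_length : Int) : Nat → Int → Int → Int → Int
  | 0, _, _, result => result
  | fuel + 1, lt, rt, result =>
    if lt ≤ rt then
      let mid := PySem.Int.floordiv (lt + rt) 2
      if target_length ≤ cut trees mid then
        searchLoop trees target_length fuel (mid + 1) rt mid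
      else
        searchLoop trees target_length fuel lt (mid - 1) result
    else result

def search (trees : List Int) (target_length : Int) : Int :=
  match PySem.List.max? trees (fun x => x) with
  | none => 0   -- max([]) raises ValueError in Python; excluded by Pre_search
  | some m => searchLoop trees target_length ((m + 1).toNat + 1) 0 m 0

-- ===== PORT B =====
-- suffix[i] = sum of ts[i:]; Source B fills the table back-to-front, which is exactly
-- this structural recursion (suffix[i] = ts[i] + suffix[i+1], suffix[n] = 0)
def suffixSums (ts : List Int) : List Int :=
  match ts with
  | [] => [0]
  | a :: r => (a + (suffixSums r).headD 0) :: suffixSums r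

-- Source B's hand-written bisect loop (lo,hi; mid=(lo+hi)//2; h < ts[mid] → hi=mid else lo=mid+1)
-- is step for step PySem.List.bisectRight's loop
def cutAt (ts suffix : List Int) (n h : Int) : Int :=
  let lo : Int := PySem.List.bisectRight ts h
  PySem.List.pyGetD suffix lo 0 - (n - lo) * h

-- B's while loop, fuel-based exactly as searchLoop
def searchAltLoop (ts suffix : List Int) (n target_length : Int) : Nat → Int → Int → Int → Int
  | 0, _, _, result => result
  | fuel + 1, lt, rt, result =>
    if lt ≤ rt then
      let mid := PySem.Int.floordiv (lt + rt) 2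
      if target_length ≤ cutAt ts suffix n mid then
        searchAltLoop ts suffix n target_length fuel (mid + 1) rt mid
      else
        searchAltLoop ts suffix n target_length fuel lt (mid - 1) result
    else result

def search_alt (trees : List Int) (target_length : Int) : Int :=
  let ts := PySem.List.sorted trees (fun x => x)
  let suffix := suffixSums ts
  let rt0 := PySem.List.pyGetD ts (-1) 0
  searchAltLoop ts suffix ts.length target_length ((rt0 + 1).toNat + 1) 0 rt0 0

-- ===== PRECONDITION & SPEC =====
-- Pre_ excludes only the empty list, on which Python A raises ValueError (max of empty sequence).
def Pre_search (trees : List Int) (target_length : Int) : Prop := trees ≠ []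
instance (trees : List Int) (target_length : Int) : Decidable (Pre_search trees target_length) := by unfold Pre_search; infer_instance
def pvWitness_search : List Int × Int := ([4, 42, 40, 26, 46], 20)

def Spec_search (trees : List Int) (target_length : Int) (out : Int) : Prop := out = search_alt trees target_length
instance (trees : List Int) (target_length : Int) (out : Int) : Decidable (Spec_search trees target_length out) := by unfold Spec_search; infer_instance

-- ===== CLAIM (what is proved, stated in full; the proofs are below) =====
def Claim_equal_search : Prop := ∀ (trees : List Int) (target_length : Int), Dom_search trees target_length → Pre_search trees target_length → Spec_search trees target_length (search trees target_length)

-- ===== LEMMAS AND PROOFS =====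

-- cut as a sum
theorem cut_eq_sum (trees : List Int) (h : Int) :
    cut trees h = (trees.map (fun t => if h < t then t - h else 0)).sum := by
  unfold cut
  have : (fun (length : Int) (tree : Int) => if h < tree then length + (tree - h) else length)
       = (fun (acc : Int) (tree : Int) => acc + (if h < tree then tree - h else 0)) := by
    funext a t; split_ifs <;> simp
  rw [this, PySem.List.foldl_add]; simp

theorem sum_map_sub (l : List Int) (h : Int) :
    (l.map (fun t => t - h)).sum = l.sum - l.length * h := by
  induction l with
  | nil => simp
  | cons a r ih => simp [ih]; ring

theorem headD_suffixSums (ts : List Int) : (suffixSums ts).headD 0 = ts.sum := by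
  induction ts with
  | nil => simp [suffixSums]
  | cons a r ih =>
    simp only [suffixSums, List.headD_cons, List.sum_cons]
    rw [ih]

theorem getD_suffixSums (ts : List Int) (c : Nat) (hc : c ≤ ts.length) :
    (suffixSums ts).getD c 0 = (ts.drop c).sum := by
  induction ts generalizing c with
  | nil =>
    have : c = 0 := by simpa using hc
    subst this; simp [suffixSums]
  | cons a r ih =>
    cases c with
    | zero => simp only [suffixSums, List.getD_cons_zero, List.drop_zero, List.sum_cons]
              rw [headD_suffixSums]
    | succ k => simp only [suffixSums, List.getD_cons_succ, List.drop_succ_cons]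
                exact ih k (by simpa using hc)

-- every member of a Pairwise-(≤) list is at most its last element
theorem mem_le_getLast (l : List Int) (hpw : l.Pairwise (· ≤ ·)) (x : Int)
    (hx : x ∈ l) (hne : l ≠ []) : x ≤ l.getLast hne := by
  obtain ⟨i, hi, rfl⟩ := List.mem_iff_getElem.mp hx
  rw [List.getLast_eq_getElem]
  by_cases hi2 : i = l.length - 1
  · exact le_of_eq (by congr 1)
  · exact (List.pairwise_iff_getElem.mp hpw) i (l.length - 1) hi (by omega) (by omega)

-- the key pointwise lemma: B's table probe equals A's scan
theorem cutAt_eq_cut (trees : List Int) (h : Int) :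
    cutAt (PySem.List.sorted trees (fun x => x)) (suffixSums (PySem.List.sorted trees (fun x => x)))
          ((PySem.List.sorted trees (fun x => x)).length) h = cut trees h := by
  set ts := PySem.List.sorted trees (fun x => x) with hts
  set g : Int → Int := fun t => if h < t then t - h else 0 with hg
  have hpw : ts.Pairwise (· ≤ ·) := by simpa using PySem.List.sorted_pairwise trees (fun x => x)
  obtain ⟨hc_le, hlo, hhi⟩ := PySem.List.bisectRight_spec ts h hpw
  set c := PySem.List.bisectRight ts h with hc
  have hperm : (List.map g ts).Perm (List.map g trees) :=
    (PySem.List.sorted_perm trees (fun x => x) false).map g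
  have hcuts : cut trees h = (List.map g ts).sum := by
    rw [cut_eq_sum]; exact hperm.sum_eq.symm
  have htake : (List.map g (ts.take c)).sum = 0 := by
    apply List.sum_eq_zero
    intro x hx
    obtain ⟨y, hy, rfl⟩ := List.mem_map.mp hx
    obtain ⟨i, hi, rfl⟩ := List.mem_iff_getElem.mp hy
    have hi' : i < ts.length := by
      have := hi; simp [List.length_take] at this; omega
    have hic : i < c := by
      have := hi; simp [List.length_take] at this; omega
    have : ts[i] ≤ h := hlo i hi' hic
    simp only [hg, List.getElem_take]
    simp [not_lt.mpr this]
  have hdrop : (List.map g (ts.drop c)).sum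
      = (ts.drop c).sum - ((ts.drop c).length : Int) * h := by
    rw [List.map_congr_left (g := fun t : Int => t - h) ?_, sum_map_sub]
    intro x hx
    obtain ⟨j, hj, rfl⟩ := List.mem_iff_getElem.mp hx
    have hj' : c + j < ts.length := by
      have := hj; simp [List.length_drop] at this; omega
    have : h < ts[c + j] := hhi (c + j) hj' (by omega)
    simp only [hg, List.getElem_drop]
    simp [this]
  have hsplit : (List.map g (ts.take c)).sum + (List.map g (ts.drop c)).sum
      = (List.map g ts).sum := by
    rw [← List.sum_append, ← List.map_append, List.take_append_drop]
  have hlen : (ts.drop c).length = ts.length - c := List.length_drop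
  simp only [cutAt, hcuts, ← hsplit, htake, zero_add, hdrop, hlen]
  rw [← hc, PySem.List.pyGetD_natCast, getD_suffixSums ts c hc_le]
  have : ((ts.length - c : Nat) : Int) = (ts.length : Int) - (c : Int) := by
    omega
  rw [this]

theorem loops_eq (trees ts suffix : List Int) (n target_length : Int)
    (hcut : ∀ h, cutAt ts suffix n h = cut trees h) :
    ∀ fuel lt rt result, searchAltLoop ts suffix n target_length fuel lt rt result
      = searchLoop trees target_length fuel lt rt result := by
  intro fuel
  induction fuel with
  | zero => intro lt rt result; rfl
  | succ k ih =>
    intro lt rt result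
    rw [searchLoop, searchAltLoop]
    by_cases hlr : lt ≤ rt
    · simp only [hlr, if_pos, hcut]
      split_ifs with h2
      · exact ih _ _ _
      · exact ih _ _ _
    · simp [hlr]

theorem last_sorted_eq_max (trees : List Int) (m : Int)
    (hm : PySem.List.max? trees (fun x => x) = some m) :
    PySem.List.pyGetD (PySem.List.sorted trees (fun x => x)) (-1) 0 = m := by
  have hmem : m ∈ trees := PySem.List.max?_mem hm
  have hmax : ∀ y ∈ trees, y ≤ m := by
    have := PySem.List.max?_isMax hm; simpa using this
  have hne : PySem.List.sorted trees (fun x => x) ≠ [] := by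
    intro hnil
    rw [PySem.List.sorted_eq_nil_iff] at hnil
    rw [(PySem.List.max?_eq_none_iff trees (fun x => x)).mpr hnil] at hm
    simp at hm
  rw [PySem.List.pyGetD_neg_one _ 0 hne]
  set ts := PySem.List.sorted trees (fun x => x) with hts
  have hpw : ts.Pairwise (· ≤ ·) := by simpa using PySem.List.sorted_pairwise trees (fun x => x)
  have h1 : ts.getLast hne ≤ m :=
    hmax _ ((PySem.List.mem_sorted trees (fun x => x) false _).mp (List.getLast_mem hne))
  have h2 : m ≤ ts.getLast hne :=
    mem_le_getLast ts hpw m ((PySem.List.mem_sorted trees (fun x => x) false m).mpr hmem) hne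
  exact le_antisymm h1 h2

-- ===== VERDICT (by name: the statement is the Claim_ definition above) =====
theorem search_spec : Claim_equal_search := by
  intro trees target_length _ hpre
  unfold Spec_search
  cases hm : PySem.List.max? trees (fun x => x) with
  | none => exact absurd ((PySem.List.max?_eq_none_iff trees _).mp hm) hpre
  | some m =>
    simp only [search, search_alt, hm]
    rw [last_sorted_eq_max trees m hm,
        loops_eq trees _ _ _ target_length (fun h => cutAt_eq_cut trees h)]
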